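-- pv_equiv track=rewrite | github.com/ajdranse/adventOfCode | 2024/2.py | calc_safety
-- ===== SOURCE A (Python) =====
-- def calc_safety(r):
--     diffs = [b - a for a, b in zip(r, r[1:])]
--     all_lt_zero = all([d < 0 for d in diffs])
--     all_gt_zero = all([d > 0 for d in diffs])
--     all_gradual = all([abs(d) <= 3 and abs(d) >= 1 for d in diffs])
--     if (all_lt_zero or all_gt_zero) and all_gradual:
--         return True
--     return False
-- ===== SOURCE B (Python) =====
-- def calc_safety(r):
--     inc = r == sorted(r)
--     dec = r == sorted(r, reverse=True)
--     return (inc or dec) and all(1 <= abs(b - a) <= 3 for a, b in zip(r, r[1:]))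
-- ===== Notes on version B (the rewrite author's own statement) =====
-- stated objective: simpler
-- what changed: Replaces A's explicit diffs list and three separate sign/gradual scans with a sort-and-compare monotonicity test plus one gradualness pass over adjacent pairs.
import Mathlib
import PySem

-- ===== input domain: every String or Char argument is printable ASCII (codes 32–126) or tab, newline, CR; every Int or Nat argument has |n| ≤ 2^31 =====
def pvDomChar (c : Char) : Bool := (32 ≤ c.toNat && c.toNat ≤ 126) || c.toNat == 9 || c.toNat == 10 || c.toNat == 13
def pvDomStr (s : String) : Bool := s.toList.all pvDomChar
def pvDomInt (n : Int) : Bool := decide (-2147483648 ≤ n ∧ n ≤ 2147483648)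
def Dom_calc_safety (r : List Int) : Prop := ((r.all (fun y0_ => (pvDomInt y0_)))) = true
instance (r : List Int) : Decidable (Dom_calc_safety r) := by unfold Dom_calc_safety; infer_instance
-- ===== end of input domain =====

-- B replaces A's explicit diffs list and three separate sign/gradual scans by a
-- sort-and-compare monotonicity test plus one gradualness pass (objective: simpler).

-- ===== PORT A =====
def calc_safety (r : List Int) : Bool :=
  let diffs := (r.zip r.tail).map (fun p => p.2 - p.1)
  let all_lt_zero := (diffs.map (fun d => decide (d < 0))).all id
  let all_gt_zero := (diffs.map (fun d => decide (d > 0))).all id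
  let all_gradual := (diffs.map (fun d => decide (|d| ≤ 3 ∧ |d| ≥ 1))).all id
  if (all_lt_zero || all_gt_zero) && all_gradual then true else false

-- ===== PORT B =====
def calc_safety_alt (r : List Int) : Bool :=
  let inc := r == PySem.List.sorted r (fun x => x) false
  let dec := r == PySem.List.sorted r (fun x => x) true
  (inc || dec) && (r.zip r.tail).all (fun p => decide (1 ≤ |p.2 - p.1| ∧ |p.2 - p.1| ≤ 3))

-- ===== PRECONDITION & SPEC =====
def Spec_calc_safety (r : List Int) (out : Bool) : Prop := out = calc_safety_alt r
instance (r : List Int) (out : Bool) : Decidable (Spec_calc_safety r out) := by unfold Spec_calc_safety; infer_instance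

-- ===== CLAIM (what is proved, stated in full; the proofs are below) =====
def Claim_equal_calc_safety : Prop := ∀ (r : List Int), Dom_calc_safety r → Spec_calc_safety r (calc_safety r)

-- ===== LEMMAS AND PROOFS =====

theorem bool_ite (c : Bool) : (if c = true then true else false) = c := by
  cases c <;> rfl

theorem pair_iff_chain (r : List Int) (R : Int → Int → Prop) :
    (∀ p ∈ r.zip r.tail, R p.1 p.2) ↔ r.IsChain R := by
  induction r with
  | nil => simp
  | cons a t ih =>
    cases t with
    | nil => simp
    | cons b u =>
      rw [List.isChain_cons_cons, ← ih]
      simp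

theorem sorted_self_iff (r : List Int) :
    r = PySem.List.sorted r (fun x => x) false ↔ ∀ p ∈ r.zip r.tail, p.1 ≤ p.2 := by
  rw [pair_iff_chain, List.isChain_iff_pairwise]
  constructor
  · intro h
    have hp := PySem.List.sorted_pairwise (xs := r) (key := fun x => x)
    rw [← h] at hp
    exact hp
  · intro h
    exact (PySem.List.sorted_eq_self_of_pairwise r (fun x => x) h).symm

theorem sorted_rev_self_iff (r : List Int) :
    r = PySem.List.sorted r (fun x => x) true ↔ ∀ p ∈ r.zip r.tail, p.2 ≤ p.1 := by
  rw [pair_iff_chain r (fun a b => b ≤ a), List.isChain_iff_pairwise]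
  constructor
  · intro h
    have hp := PySem.List.sorted_pairwise_rev (xs := r) (key := fun x => x)
    rw [← h] at hp
    exact hp
  · intro h
    exact (PySem.List.sorted_rev_eq_self_of_pairwise r (fun x => x) h).symm

theorem calc_safety_agrees (r : List Int) : calc_safety r = calc_safety_alt r := by
  rw [Bool.eq_iff_iff]
  unfold calc_safety calc_safety_alt
  rw [bool_ite]
  simp only [List.all_map, id_eq, Bool.and_eq_true, Bool.or_eq_true, List.all_eq_true,
    decide_eq_true_eq, beq_iff_eq, Function.comp_def]
  rw [sorted_self_iff, sorted_rev_self_iff]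
  constructor
  · rintro ⟨hm, hg⟩
    refine ⟨?_, fun p hp => ?_⟩
    · rcases hm with h | h
      · exact Or.inr (fun p hp => le_of_lt (by have := h p hp; omega))
      · exact Or.inl (fun p hp => le_of_lt (by have := h p hp; omega))
    · have := hg p hp
      omega
  · rintro ⟨hm, hg⟩
    refine ⟨?_, fun p hp => ?_⟩
    · rcases hm with h | h
      · refine Or.inr (fun p hp => ?_)
        have h1 := h p hp
        have h2 := hg p hp
        rcases abs_cases (p.2 - p.1) with ⟨he, _⟩ | ⟨he, _⟩ <;> omega
      · refine Or.inl (fun p hp => ?_)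
        have h1 := h p hp
        have h2 := hg p hp
        rcases abs_cases (p.2 - p.1) with ⟨he, _⟩ | ⟨he, _⟩ <;> omega
    · have := hg p hp
      omega

-- ===== VERDICT (by name: the statement is the Claim_ definition above) =====
theorem calc_safety_spec : Claim_equal_calc_safety := by
  intro r _
  exact calc_safety_agrees r
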